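-- pv_equiv track=rewrite | github.com/surajmeruva0786/trafficRL | traffic_rl/utils/regime_utils.py | detect_regime_shifts
-- ===== SOURCE A (Python) =====
-- from typing import List, Dict, Tuple
--
-- def detect_regime_shifts(
--     regime_history: List[int],
--     min_duration: int = 10
-- ) -> List[Tuple[int, int, int]]:
--     """
--     Detect regime shift points in the timeline.
--
--     Args:
--         regime_history: List of regime labels over time
--         min_duration: Minimum duration to consider a stable regime
--
--     Returns:
--         List of (start_idx, end_idx, regime) tuples for each regime segment
--     """
--     if not regime_history:
--         return []
--
--     segments = []
--     current_regime = regime_history[0]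
--     start_idx = 0
--
--     for i, regime in enumerate(regime_history[1:], start=1):
--         if regime != current_regime:
--             # Regime changed
--             duration = i - start_idx
--             if duration >= min_duration:
--                 segments.append((start_idx, i - 1, current_regime))
--             current_regime = regime
--             start_idx = i
--
--     # Add final segment
--     duration = len(regime_history) - start_idx
--     if duration >= min_duration:
--         segments.append((start_idx, len(regime_history) - 1, current_regime))
--
--     return segments
-- ===== SOURCE B (Python) =====
-- from typing import List, Tuple
--
--
-- def detect_regime_shifts(
--     regime_history: List[int],
--     min_duration: int = 10
-- ) -> List[Tuple[int, int, int]]: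
--     # Staged passes: first collect every change point, then pair up adjacent
--     # boundaries and keep the segments that are long enough.
--     if not regime_history:
--         return []
--     n = len(regime_history)
--     bounds = [0] + [i for i in range(1, n)
--                     if regime_history[i] != regime_history[i - 1]] + [n]
--     return [(s, e - 1, regime_history[s])
--             for s, e in zip(bounds, bounds[1:])
--             if e - s >= min_duration]
-- ===== Notes on version B (the rewrite author's own statement) =====
-- stated objective: alternative
-- what changed: Replaces A's one-pass state machine (current_regime/start_idx with a separate trailing-segment step) by staged passes: first build the list of all change-point boundaries, then zip adjacent boundaries into segments and filter by duration.
import Mathlib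
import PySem

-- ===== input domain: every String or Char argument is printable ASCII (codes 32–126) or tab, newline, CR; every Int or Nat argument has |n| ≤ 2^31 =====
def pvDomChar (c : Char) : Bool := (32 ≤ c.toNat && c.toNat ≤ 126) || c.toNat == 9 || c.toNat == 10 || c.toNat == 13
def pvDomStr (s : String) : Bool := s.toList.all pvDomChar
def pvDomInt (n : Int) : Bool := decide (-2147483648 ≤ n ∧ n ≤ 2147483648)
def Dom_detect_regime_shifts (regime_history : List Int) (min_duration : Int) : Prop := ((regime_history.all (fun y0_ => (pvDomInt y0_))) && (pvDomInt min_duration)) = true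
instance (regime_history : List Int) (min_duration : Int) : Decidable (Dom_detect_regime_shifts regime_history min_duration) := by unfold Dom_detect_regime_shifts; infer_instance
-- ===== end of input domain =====

-- B replaces A's one-pass state machine (current_regime/start_idx + trailing-segment step)
-- by staged passes: collect all change-point boundaries, then zip adjacent boundaries into
-- segments filtered by duration; an alternative decomposition of the same linear cost.


-- ===== PORT A =====
-- loop body of A's `for i, regime in enumerate(regime_history[1:], start=1)`,
-- state = (segments, current_regime, start_idx, i)
def pvStepA (md : Int) (st : List (Int × Int × Int) × Int × Int × Int) (regime : Int) :
    List (Int × Int × Int) × Int × Int × Int :=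
  let (segs, cur, start, i) := st
  if regime ≠ cur then
    let segs := if i - start ≥ md then segs ++ [(start, i - 1, cur)] else segs
    (segs, regime, i, i + 1)
  else
    (segs, cur, start, i + 1)

def detect_regime_shifts (regime_history : List Int) (min_duration : Int) : List (Int × Int × Int) :=
  match regime_history with
  | [] => []
  | x :: xs =>
    let st := xs.foldl (pvStepA min_duration) ([], x, 0, 1)
    let (segs, cur, start, _) := st
    let n : Int := ((x :: xs).length : Int)
    if n - start ≥ min_duration then segs ++ [(start, n - 1, cur)] else segs

-- ===== PORT B =====
-- `[i for i in range(1, n) if regime_history[i] != regime_history[i-1]]`;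
-- the getD accesses are exact: every i drawn from range(1, n) is in bounds.
def pvChg (l : List Int) : List Int :=
  (PySem.List.pyRange 1 (l.length : Int) 1).filter
    (fun i => decide (l.getD i.toNat 0 ≠ l.getD (i.toNat - 1) 0))

def detect_regime_shifts_alt (regime_history : List Int) (min_duration : Int) : List (Int × Int × Int) :=
  if regime_history = [] then []
  else
    let n : Int := (regime_history.length : Int)
    let bounds : List Int := [0] ++ pvChg regime_history ++ [n]
    ((bounds.zip (bounds.drop 1)).filter (fun p => decide (p.2 - p.1 ≥ min_duration))).map
      (fun p => (p.1, p.2 - 1, regime_history.getD p.1.toNat 0))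

-- ===== PRECONDITION & SPEC =====
def Spec_detect_regime_shifts (regime_history : List Int) (min_duration : Int) (out : List (Int × Int × Int)) : Prop := out = detect_regime_shifts_alt regime_history min_duration
instance (regime_history : List Int) (min_duration : Int) (out : List (Int × Int × Int)) : Decidable (Spec_detect_regime_shifts regime_history min_duration out) := by unfold Spec_detect_regime_shifts; infer_instance

-- ===== CLAIM (what is proved, stated in full; the proofs are below) =====
def Claim_equal_detect_regime_shifts : Prop := ∀ (regime_history : List Int) (min_duration : Int), Dom_detect_regime_shifts regime_history min_duration → Spec_detect_regime_shifts regime_history min_duration (detect_regime_shifts regime_history min_duration)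

-- ===== LEMMAS AND PROOFS =====

theorem pvChg_singleton (x : Int) : pvChg [x] = [] := by
  simp [pvChg, PySem.List.pyRange_one_eq_nil]
theorem pyRange_two_shift (b : Int) :
    PySem.List.pyRange 2 b 1 = (PySem.List.pyRange 1 (b-1) 1).map (· + 1) := by
  rw [PySem.List.pyRange_one, PySem.List.pyRange_one]
  rw [show b - 1 - 1 = b - 2 by ring]
  rw [List.map_map]
  exact List.map_congr_left fun k _ => by simp [Function.comp]; ring
theorem pvChg_cons (x y : Int) (ys : List Int) :
    pvChg (x :: y :: ys) =
      (if y ≠ x then [(1 : Int)] else []) ++ (pvChg (y :: ys)).map (· + 1) := by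
  unfold pvChg
  simp only [List.length_cons]
  have hb : (1 : Int) < ((ys.length : Int) + 1 + 1) := by omega
  rw [show (((ys.length + 1 + 1 : Nat) : Int)) = ((ys.length : Int) + 1 + 1) by push_cast; ring]
  rw [PySem.List.pyRange_one_cons hb]
  rw [show (1:Int)+1 = 2 from rfl, pyRange_two_shift]
  rw [show ((ys.length : Int) + 1 + 1 - 1) = (((ys.length + 1 : Nat)) : Int) by push_cast; ring]
  rw [List.filter_cons]
  rw [List.filter_map]
  have hhead : (decide ((x :: y :: ys).getD (1:Int).toNat 0 ≠ (x :: y :: ys).getD ((1:Int).toNat - 1) 0)) = decide (y ≠ x) := by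
    simp
  rw [hhead]
  have htail : List.filter ((fun i => decide ((x :: y :: ys).getD i.toNat 0 ≠ (x :: y :: ys).getD (i.toNat - 1) 0)) ∘ (· + 1)) (PySem.List.pyRange 1 (((ys.length + 1 : Nat)) : Int) 1)
      = List.filter (fun i => decide ((y :: ys).getD i.toNat 0 ≠ (y :: ys).getD (i.toNat - 1) 0)) (PySem.List.pyRange 1 (((ys.length + 1 : Nat)) : Int) 1) := by
    apply List.filter_congr
    intro i hi
    have h1 : 1 ≤ i := (PySem.List.mem_pyRange_one.mp hi).1
    obtain ⟨m, hm⟩ : ∃ m : Nat, i.toNat = m + 1 := ⟨i.toNat - 1, by omega⟩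
    have h2 : (i + 1).toNat = i.toNat + 1 := by omega
    simp only [Function.comp, h2, hm]
    simp
  rw [htail]
  by_cases hxy : y = x <;> simp [hxy]

def pvLead (c : Int) : List Int → Int
  | [] => 0
  | y :: ys => if y = c then 1 + pvLead c ys else 0

def pvDropRun (c : Int) : List Int → List Int
  | [] => []
  | y :: ys => if y = c then pvDropRun c ys else y :: ys

theorem pvLead_nonneg (c : Int) : ∀ (t : List Int), 0 ≤ pvLead c t := by
  intro t; induction t with
  | nil => simp [pvLead]
  | cons y ys ih => simp only [pvLead]; split <;> omega

theorem pvChg_pos (l : List Int) : ∀ i ∈ pvChg l, 1 ≤ i := by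
  intro i hi
  unfold pvChg at hi
  exact (PySem.List.mem_pyRange_one.mp (List.mem_filter.mp hi).1).1

theorem pvChg_run (x : Int) (xs : List Int) :
    pvChg (x :: xs) =
      if pvDropRun x xs = [] then []
      else (1 + pvLead x xs) :: (pvChg (pvDropRun x xs)).map (· + (1 + pvLead x xs)) := by
  induction xs generalizing x with
  | nil => simp [pvChg_singleton, pvDropRun]
  | cons y ys ih =>
    by_cases h : y = x
    · subst h
      have hL : pvLead y (y :: ys) = 1 + pvLead y ys := by simp [pvLead]
      have hD : pvDropRun y (y :: ys) = pvDropRun y ys := by simp [pvDropRun]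
      rw [pvChg_cons, hL, hD, ih y]
      by_cases hd : pvDropRun y ys = []
      · simp [hd]
      · simp only [ne_eq, not_true_eq_false, if_false, List.nil_append, if_neg hd,
          List.map_cons, List.map_map]
        congr 1
        · ring
        · exact List.map_congr_left fun a _ => by simp only [Function.comp_apply]; ring
    · have hL : pvLead x (y :: ys) = 0 := by simp [pvLead, h]
      have hD : pvDropRun x (y :: ys) = y :: ys := by simp [pvDropRun, h]
      rw [pvChg_cons, hL, hD]
      simp [h]

theorem pvDropRun_length (c : Int) : ∀ (t : List Int), (pvDropRun c t).length ≤ t.length := by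
  intro t; induction t with
  | nil => simp [pvDropRun]
  | cons y ys ih =>
    simp only [pvDropRun]
    split
    · simp; omega
    · simp

def pvGo (md : Int) : List Int → Int → List (Int × Int × Int)
  | [], _ => []
  | x :: xs, start =>
    let length : Int := 1 + pvLead x xs
    let e := start + length - 1
    (if length ≥ md then [(start, e, x)] else []) ++ pvGo md (pvDropRun x xs) (e + 1)
termination_by t _ => t.length
decreasing_by
  have := pvDropRun_length x xs; simp; omega

theorem pvGo_cons (md x : Int) (xs : List Int) (start : Int) :
    pvGo md (x :: xs) start =
      (if 1 + pvLead x xs ≥ md then [(start, start + (1 + pvLead x xs) - 1, x)] else [])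
        ++ pvGo md (pvDropRun x xs) (start + (1 + pvLead x xs) - 1 + 1) := by
  rw [pvGo]

theorem pvLead_add_dropRun_length (c : Int) :
    ∀ (t : List Int), pvLead c t + ((pvDropRun c t).length : Int) = (t.length : Int) := by
  intro t; induction t with
  | nil => simp [pvLead, pvDropRun]
  | cons y ys ih =>
    simp only [pvLead, pvDropRun]
    split
    · simp only [List.length_cons]; push_cast; omega
    · simp only [List.length_cons]; push_cast; omega

theorem pvDropRun_eq_drop (c : Int) :
    ∀ (t : List Int), pvDropRun c t = t.drop (pvLead c t).toNat := by
  intro t; induction t with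
  | nil => simp [pvLead, pvDropRun]
  | cons y ys ih =>
    simp only [pvLead, pvDropRun]
    split
    · rw [ih]
      have h : ((1 : Int) + pvLead c ys).toNat = (pvLead c ys).toNat + 1 := by
        have := pvLead_nonneg c ys; omega
      rw [h]; simp
    · simp

def pvBnds (l : List Int) (s : Int) : List Int :=
  s :: ((pvChg l).map (· + s) ++ [s + (l.length : Int)])

def pvPairs (md : Int) (l : List Int) (s : Int) : List (Int × Int × Int) :=
  (((pvBnds l s).zip ((pvBnds l s).drop 1)).filter (fun p => decide (p.2 - p.1 ≥ md))).map
    (fun p => (p.1, p.2 - 1, l.getD (p.1 - s).toNat 0))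

theorem getD_drop_add (l : List Int) (k m : Nat) :
    l.getD (k + m) 0 = (l.drop k).getD m 0 := by
  simp [List.getD_eq_getElem?_getD, List.getElem?_drop]

theorem pvPairs_done (md x : Int) (xs : List Int) (s : Int)
    (hd : pvDropRun x xs = []) : pvGo md (x :: xs) s = pvPairs md (x :: xs) s := by
  have hlen : pvLead x xs = (xs.length : Int) := by
    have := pvLead_add_dropRun_length x xs; rw [hd] at this; simpa using this
  rw [pvGo_cons, hd]
  unfold pvPairs pvBnds
  rw [pvChg_run x xs, if_pos hd]
  simp only [List.map_nil, List.nil_append, List.length_cons, List.drop_succ_cons,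
    List.drop_zero, List.zip_cons_cons, List.zip_nil_right, List.filter_cons, List.filter_nil,
    pvGo, List.append_nil]
  have harith : decide (s + ((xs.length + 1 : Nat) : Int) - s ≥ md) = decide (1 + pvLead x xs ≥ md) := by
    rw [hlen]; push_cast; congr 1; rw [eq_iff_iff]; constructor <;> intro <;> omega
  rw [harith]
  by_cases hmd : 1 + pvLead x xs ≥ md
  · simp only [decide_eq_true_eq, if_pos hmd, List.map_cons, List.map_nil]
    simp [hlen]
    ring
  · simp [hmd]

theorem pvPairs_step (md x : Int) (xs : List Int) (s : Int)
    (hd : pvDropRun x xs ≠ []) :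
    pvPairs md (x :: xs) s =
      (if 1 + pvLead x xs ≥ md then [(s, s + (1 + pvLead x xs) - 1, x)] else [])
        ++ pvPairs md (pvDropRun x xs) (s + (1 + pvLead x xs)) := by
  have hL0 : 0 ≤ pvLead x xs := pvLead_nonneg x xs
  have hlen : pvLead x xs + (((pvDropRun x xs).length : Int)) = (xs.length : Int) :=
    pvLead_add_dropRun_length x xs
  set L : Int := 1 + pvLead x xs with hLdef
  set d : List Int := pvDropRun x xs with hddef
  have hbnds : pvBnds (x :: xs) s = s :: pvBnds d (s + L) := by
    unfold pvBnds
    rw [pvChg_run x xs, if_neg hd, ← hddef, ← hLdef]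
    simp only [List.map_cons, List.map_map, List.cons_append, List.length_cons]
    congr 2
    · ring
    · congr 1
      · exact List.map_congr_left fun a _ => by simp only [Function.comp_apply]; ring
      · congr 1; push_cast; omega
  unfold pvPairs
  rw [hbnds]
  rw [show (s :: pvBnds d (s + L)).drop 1 = pvBnds d (s + L) from rfl]
  have hzip : (s :: pvBnds d (s + L)).zip (pvBnds d (s + L))
      = (s, s + L) :: ((pvBnds d (s + L)).zip ((pvBnds d (s + L)).drop 1)) := by
    unfold pvBnds
    simp only [List.drop_succ_cons, List.drop_zero, List.zip_cons_cons]
  rw [hzip, List.filter_cons]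
  have hdec : decide ((s, s + L).2 - (s, s + L).1 ≥ md) = decide (L ≥ md) := by
    congr 1; rw [eq_iff_iff]; constructor <;> intro <;> omega
  rw [hdec]
  have hmem : ∀ p ∈ ((pvBnds d (s + L)).zip ((pvBnds d (s + L)).drop 1)).filter
      (fun p => decide (p.2 - p.1 ≥ md)),
      (fun p : Int × Int => (p.1, p.2 - 1, (x :: xs).getD (p.1 - s).toNat 0)) p
        = (fun p : Int × Int => (p.1, p.2 - 1, d.getD (p.1 - (s + L)).toNat 0)) p := by
    intro p hp
    have h1 : p.1 ∈ pvBnds d (s + L) :=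
      (List.of_mem_zip (List.mem_filter.mp hp).1).1
    have hq : s + L ≤ p.1 := by
      unfold pvBnds at h1
      rcases List.mem_cons.mp h1 with h | h
      · omega
      · rcases List.mem_append.mp h with h | h
        · obtain ⟨a, ha, hae⟩ := List.mem_map.mp h
          have := pvChg_pos d a ha; omega
        · simp only [List.mem_singleton] at h; omega
    simp only
    congr 2
    have htn : (p.1 - s).toNat = L.toNat + (p.1 - (s + L)).toNat := by omega
    rw [htn, getD_drop_add]
    have hdrop : (x :: xs).drop L.toNat = d := by
      have hLt : L.toNat = (pvLead x xs).toNat + 1 := by omega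
      rw [hLt, List.drop_succ_cons, hddef, pvDropRun_eq_drop]
    rw [hdrop]
  by_cases hmd : L ≥ md
  · rw [if_pos (by simpa using hmd), if_pos hmd, List.map_cons, List.map_congr_left hmem]
    simp
  · rw [if_neg (by simpa using hmd), if_neg hmd, List.nil_append]
    exact List.map_congr_left hmem

theorem pvGo_eq_pairs (md : Int) : ∀ (k : Nat) (x : Int) (xs : List Int) (s : Int),
    xs.length ≤ k → 0 ≤ s → pvGo md (x :: xs) s = pvPairs md (x :: xs) s := by
  intro k
  induction k with
  | zero =>
    intro x xs s hk hs
    have hxs : xs = [] := List.eq_nil_of_length_eq_zero (Nat.le_zero.mp hk)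
    subst hxs
    exact pvPairs_done md x [] s (by simp [pvDropRun])
  | succ k ih =>
    intro x xs s hk hs
    by_cases hd : pvDropRun x xs = []
    · exact pvPairs_done md x xs s hd
    · rw [pvGo_cons, pvPairs_step md x xs s hd]
      congr 1
      rw [show s + (1 + pvLead x xs) - 1 + 1 = s + (1 + pvLead x xs) by ring]
      cases hE : pvDropRun x xs with
      | nil => exact absurd hE hd
      | cons h t =>
        have hlt : t.length ≤ k := by
          have h1 := pvDropRun_length x xs
          rw [hE] at h1; simp at h1; omega
        exact ih h t (s + (1 + pvLead x xs)) hlt (by have := pvLead_nonneg x xs; omega)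

-- A's fold equals the run recursion (loop invariant, generalized state)
theorem loopA_eq (md : Int) : ∀ (t : List Int) (segs : List (Int × Int × Int)) (c s i : Int),
    (let st := t.foldl (pvStepA md) (segs, c, s, i)
     if (i + (t.length : Int)) - st.2.2.1 ≥ md
     then st.1 ++ [(st.2.2.1, i + (t.length : Int) - 1, st.2.1)] else st.1)
    = segs ++ (if (i - s) + pvLead c t ≥ md then [(s, i - 1 + pvLead c t, c)] else [])
        ++ pvGo md (pvDropRun c t) (i + pvLead c t) := by
  intro t
  induction t with
  | nil =>
    intro segs c s i
    simp only [List.foldl_nil, pvLead, pvDropRun, pvGo, List.length_nil]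
    split <;> simp <;> omega
  | cons r rs ih =>
    intro segs c s i
    by_cases h : r = c
    · subst h
      have hstep : pvStepA md (segs, r, s, i) r = (segs, r, s, i + 1) := by simp [pvStepA]
      have hL : pvLead r (r :: rs) = 1 + pvLead r rs := by simp [pvLead]
      have hD : pvDropRun r (r :: rs) = pvDropRun r rs := by simp [pvDropRun]
      simp only [List.foldl_cons, hstep, hL, hD, List.length_cons]
      push_cast
      rw [show (i + ((rs.length : Int) + 1)) = (i + 1) + (rs.length : Int) by ring]
      rw [ih segs r s (i + 1)]
      rw [show (i - s) + (1 + pvLead r rs) = (i + 1 - s) + pvLead r rs by ring]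
      rw [show i - 1 + (1 + pvLead r rs) = (i + 1) - 1 + pvLead r rs by ring]
      rw [show i + (1 + pvLead r rs) = (i + 1) + pvLead r rs by ring]
    · have hstep : pvStepA md (segs, c, s, i) r
          = ((if i - s ≥ md then segs ++ [(s, i - 1, c)] else segs), r, i, i + 1) := by
        simp [pvStepA, h]
      have hL : pvLead c (r :: rs) = 0 := by simp [pvLead, h]
      have hD : pvDropRun c (r :: rs) = r :: rs := by simp [pvDropRun, h]
      simp only [List.foldl_cons, hstep, hL, hD, List.length_cons]
      push_cast
      rw [show (i + ((rs.length : Int) + 1)) = (i + 1) + (rs.length : Int) by ring]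
      rw [ih (if i - s ≥ md then segs ++ [(s, i - 1, c)] else segs) r i (i + 1)]
      rw [pvGo_cons]
      rw [show (i : Int) + 1 - i = 1 by ring]
      simp only [add_zero]
      rw [show (i : Int) + (1 + pvLead r rs) - 1 + 1 = i + 1 + pvLead r rs by ring]
      rw [show (i : Int) + 1 - 1 + pvLead r rs = i + (1 + pvLead r rs) - 1 by ring]
      split <;> simp [List.append_assoc]

-- ===== VERDICT (by name: the statement is the Claim_ definition above) =====
theorem detect_regime_shifts_spec : Claim_equal_detect_regime_shifts := by
  intro l md _
  unfold Spec_detect_regime_shifts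
  match l with
  | [] => simp [detect_regime_shifts, detect_regime_shifts_alt]
  | x :: xs =>
    have hA : detect_regime_shifts (x :: xs) md = pvGo md (x :: xs) 0 := by
      unfold detect_regime_shifts
      simp only [List.length_cons]
      push_cast
      rw [show ((xs.length : Int) + 1) = 1 + (xs.length : Int) by ring]
      rw [loopA_eq md xs [] x 0 1]
      rw [pvGo_cons]
      rw [show ((1 : Int) - 0) + pvLead x xs = 1 + pvLead x xs by ring]
      rw [show ((1 : Int) - 1) + pvLead x xs = 0 + (1 + pvLead x xs) - 1 by ring]
      rw [show ((1 : Int)) + pvLead x xs = 0 + (1 + pvLead x xs) - 1 + 1 by ring]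
      simp
    have hB : detect_regime_shifts_alt (x :: xs) md = pvPairs md (x :: xs) 0 := by
      unfold detect_regime_shifts_alt pvPairs pvBnds
      simp only [if_neg (List.cons_ne_nil x xs)]
      simp
    rw [hA, pvGo_eq_pairs md xs.length x xs 0 le_rfl le_rfl, hB]
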